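-- pv_equiv track=rewrite | github.com/MrBrantCode/unitest_baseline | mut_generate/mist_train_cf/cf_54401/solution.py | calculate_disparity
-- ===== SOURCE A (Python) =====
-- def calculate_disparity(list1, list2):
--     set1 = set(list1)
--     set2 = set(list2)
--     unique_elements = set1.symmetric_difference(set2)
--     frequency_dict = {}
--
--     for element in list1:
--         if element in unique_elements:
--             if element in frequency_dict:
--                 frequency_dict[element] += 1
--             else:
--                 frequency_dict[element] = 1
--
--     for element in list2:
--         if element in unique_elements:
--             if element in frequency_dict:
--                 frequency_dict[element] += 1
--             else:
--                 frequency_dict[element] = 1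
--     return frequency_dict
-- ===== SOURCE B (Python) =====
-- from collections import Counter
--
-- def calculate_disparity(list1, list2):
--     c1 = Counter(list1)
--     c2 = Counter(list2)
--     only1 = {k: v for k, v in c1.items() if k not in c2}
--     only2 = {k: v for k, v in c2.items() if k not in c1}
--     return {**only1, **only2}
-- ===== Notes on version B (the rewrite author's own statement) =====
-- stated objective: simpler
-- what changed: Replaces A's precomputed symmetric-difference set and its two guarded count-as-you-go loops with two full Counter tables built first, then a combine step that keeps each key not present in the other table; the per-element membership-and-increment control flow disappears.
import Mathlib
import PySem

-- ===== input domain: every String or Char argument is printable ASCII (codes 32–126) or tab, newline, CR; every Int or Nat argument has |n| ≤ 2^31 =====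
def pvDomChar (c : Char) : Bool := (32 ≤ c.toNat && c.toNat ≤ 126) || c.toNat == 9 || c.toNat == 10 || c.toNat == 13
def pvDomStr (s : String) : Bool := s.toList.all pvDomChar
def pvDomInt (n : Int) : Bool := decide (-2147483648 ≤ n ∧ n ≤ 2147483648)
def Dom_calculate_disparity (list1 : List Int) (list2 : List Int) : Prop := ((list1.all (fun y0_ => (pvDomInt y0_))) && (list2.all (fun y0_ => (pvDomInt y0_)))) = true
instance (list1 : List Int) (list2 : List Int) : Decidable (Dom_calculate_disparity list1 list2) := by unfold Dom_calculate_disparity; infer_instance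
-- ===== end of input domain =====

-- B builds two full Counter tables first and combines the keys each table has and the other lacks,
-- replacing A's precomputed symmetric-difference set and its two guarded membership-and-increment loops (objective: simpler).


-- ===== PORT A =====
-- the body of A's two identical counting loops: if e in d: d[e] += 1 else: d[e] = 1, guarded by membership in `unique`
def pvCountStep (unique : PySem.Set Int) (d : PySem.Dict Int Int) (e : Int) : PySem.Dict Int Int :=
  if PySem.Set.contains unique e then
    (if d.contains e then d.insert e (d.getD e 0 + 1) else d.insert e 1)
  else d

def calculate_disparity (list1 : List Int) (list2 : List Int) : List (Int × Int) :=
  let set1 := PySem.Set.ofList list1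
  let set2 := PySem.Set.ofList list2
  let unique := PySem.Set.symmDiff set1 set2
  let d1 := list1.foldl (pvCountStep unique) PySem.Dict.empty
  let d2 := list2.foldl (pvCountStep unique) d1
  d2.items

-- ===== PORT B =====
-- {**only1, **only2}: the two comprehensions have disjoint key sets (a key of c1 kept is absent from c2
-- and vice versa), so the merged dict's items are exactly the concatenation of the two filtered item lists.
def calculate_disparity_alt (list1 : List Int) (list2 : List Int) : List (Int × Int) :=
  let c1 : PySem.Dict Int Int := PySem.Dict.counter list1
  let c2 : PySem.Dict Int Int := PySem.Dict.counter list2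
  let only1 := c1.items.filter (fun p => !(c2.contains p.1))
  let only2 := c2.items.filter (fun p => !(c1.contains p.1))
  only1 ++ only2

-- ===== PRECONDITION & SPEC =====
def Spec_calculate_disparity (list1 : List Int) (list2 : List Int) (out : List (Int × Int)) : Prop := out = calculate_disparity_alt list1 list2
instance (list1 : List Int) (list2 : List Int) (out : List (Int × Int)) : Decidable (Spec_calculate_disparity list1 list2 out) := by unfold Spec_calculate_disparity; infer_instance

-- ===== CLAIM (what is proved, stated in full; the proofs are below) =====
def Claim_equal_calculate_disparity : Prop := ∀ (list1 : List Int) (list2 : List Int), Dom_calculate_disparity list1 list2 → Spec_calculate_disparity list1 list2 (calculate_disparity list1 list2)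

-- ===== LEMMAS AND PROOFS =====

-- the unguarded count step of A, with the contains-branch folded into one insert
def pvIns (d : PySem.Dict Int Int) (e : Int) : PySem.Dict Int Int := d.insert e (d.getD e 0 + 1)

theorem pvCountStep_eq (u : PySem.Set Int) (d : PySem.Dict Int Int) (e : Int) :
    pvCountStep u d e = if PySem.Set.contains u e then pvIns d e else d := by
  unfold pvCountStep pvIns
  by_cases hc : d.contains e = true
  · simp [hc]
  · have : d.getD e 0 = 0 := PySem.Dict.getD_of_not_contains d 0 (by simpa using hc)
    simp [hc, this]

theorem pvGet?_mk_append (A B : List (Int × Int)) (e : Int) (h : e ∉ A.map Prod.fst) :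
    (PySem.Dict.mk (A ++ B)).get? e = (PySem.Dict.mk B).get? e := by
  induction A with
  | nil => rfl
  | cons p A ih =>
    obtain ⟨k, v⟩ := p
    have hke : k ≠ e := by simp at h; exact fun he => h.1 he.symm
    rw [List.cons_append, PySem.Dict.get?_mk_cons]
    simp only [beq_iff_eq, if_neg hke]
    exact ih (by simp at h ⊢; exact h.2)

theorem pvContains_mk_append (A B : List (Int × Int)) (e : Int) (h : e ∉ A.map Prod.fst) :
    (PySem.Dict.mk (A ++ B)).contains e = (PySem.Dict.mk B).contains e := by
  rw [PySem.Dict.contains_eq_isSome_get?, PySem.Dict.contains_eq_isSome_get?, pvGet?_mk_append A B e h]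

-- a counting fold whose keys all avoid the prefix A of the dict leaves A untouched
theorem pvFoldl_ins_append (l : List Int) (A : List (Int × Int)) :
    ∀ B : List (Int × Int), (∀ e ∈ l, e ∉ A.map Prod.fst) →
    (l.foldl pvIns (PySem.Dict.mk (A ++ B))).items = A ++ (l.foldl pvIns (PySem.Dict.mk B)).items := by
  induction l with
  | nil => intro B _; rfl
  | cons e l ih =>
    intro B h
    have he : e ∉ A.map Prod.fst := h e (by simp)
    have hstep : pvIns (PySem.Dict.mk (A ++ B)) e = PySem.Dict.mk (A ++ (pvIns (PySem.Dict.mk B) e).items) := by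
      unfold pvIns
      have hgd : (PySem.Dict.mk (A ++ B)).getD e 0 = (PySem.Dict.mk B).getD e 0 := by
        rw [PySem.Dict.getD_eq_get?_getD, PySem.Dict.getD_eq_get?_getD, pvGet?_mk_append A B e he]
      apply PySem.Dict.ext
      rw [hgd, PySem.Dict.items_insert, PySem.Dict.items_insert, pvContains_mk_append A B e he]
      by_cases hc : (PySem.Dict.mk B).contains e = true
      · simp only [hc, if_true]
        show (A ++ B).map _ = A ++ B.map _
        rw [List.map_append]
        congr 1
        conv_rhs => rw [← List.map_id A]
        apply List.map_congr_left
        intro p hp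
        have : p.1 ≠ e := fun hpe => he (hpe ▸ List.mem_map_of_mem hp)
        simp [this]
      · simp only [Bool.not_eq_true] at hc
        simp only [hc, Bool.false_eq_true, if_false]
        show (A ++ B) ++ _ = A ++ (B ++ _)
        rw [List.append_assoc]
    rw [List.foldl_cons, List.foldl_cons, hstep,
        ih _ (fun e' he' => h e' (by simp [he']))]

-- dedup (in first-occurrence order) commutes with filter
theorem pvOfList_filter (q : Int → Bool) (l : List Int) :
    PySem.Set.ofList (l.filter q) = (PySem.Set.ofList l).filter q := by
  induction l using List.reverseRecOn with
  | nil => rfl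
  | append_singleton l x ih =>
    have hof : ∀ (m : List Int) (y : Int), PySem.Set.ofList (m ++ [y]) = PySem.Set.add (PySem.Set.ofList m) y := by
      intro m y
      simp [PySem.Set.ofList_eq_foldl, List.foldl_append]
    rw [List.filter_append, hof]
    by_cases hq : q x = true
    · simp only [List.filter_cons, hq, if_true, List.filter_nil, hof]
      rw [ih]
      by_cases hm : x ∈ PySem.Set.ofList l
      · rw [PySem.Set.add_of_mem hm]
        have hx : x ∈ (PySem.Set.ofList l).filter q := List.mem_filter.2 ⟨hm, hq⟩
        rw [PySem.Set.add_of_mem hx]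
      · rw [PySem.Set.add_of_not_mem hm, List.filter_append]
        have hx : x ∉ (PySem.Set.ofList l).filter q := fun hx => hm (List.mem_filter.1 hx).1
        rw [PySem.Set.add_of_not_mem hx]
        simp [hq]
    · have hfx : List.filter q [x] = [] := by simp [hq]
      rw [hfx, List.append_nil, ih]
      by_cases hm : x ∈ PySem.Set.ofList l
      · rw [PySem.Set.add_of_mem hm]
      · rw [PySem.Set.add_of_not_mem hm, List.filter_append, hfx, List.append_nil]

-- ===== VERDICT (by name: the statement is the Claim_ definition above) =====
-- the guard of A's loops, as a Bool predicate on an element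
theorem pvStep_funext (u : PySem.Set Int) :
    pvCountStep u = fun d e => if PySem.Set.contains u e then pvIns d e else d := by
  funext d e; exact pvCountStep_eq u d e

-- for x drawn from list1, membership in the symmetric difference is absence from list2 (and symmetrically)
theorem pvGuard1 (list1 list2 : List Int) (x : Int) (hx : x ∈ list1) :
    PySem.Set.contains (PySem.Set.symmDiff (PySem.Set.ofList list1) (PySem.Set.ofList list2)) x
      = !(list2.contains x) := by
  rw [Bool.eq_iff_iff]
  simp [PySem.Set.mem_symmDiff, PySem.Set.mem_ofList, hx]

theorem pvGuard2 (list1 list2 : List Int) (x : Int) (hx : x ∈ list2) :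
    PySem.Set.contains (PySem.Set.symmDiff (PySem.Set.ofList list1) (PySem.Set.ofList list2)) x
      = !(list1.contains x) := by
  rw [Bool.eq_iff_iff]
  simp [PySem.Set.mem_symmDiff, PySem.Set.mem_ofList, hx]

-- A's guarded counting loop over li computes Counter(li filtered by the guard)
theorem pvLoop_eq_counter (u : PySem.Set Int) (l : List Int) :
    l.foldl (pvCountStep u) PySem.Dict.empty
      = PySem.Dict.counter (l.filter (fun e => PySem.Set.contains u e)) := by
  rw [pvStep_funext, PySem.List.foldl_if_eq_foldl_filter (fun e => PySem.Set.contains u e) pvIns]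
  exact PySem.Dict.foldl_insert_getD_add_one_eq_counter _

-- one filtered Counter's item list, rephrased as B computes it
theorem pvCounter_filter_items (la lb : List Int) :
    (PySem.Dict.counter (la.filter (fun e => !(lb.contains e))) : PySem.Dict Int Int).items
      = (PySem.Dict.counter la : PySem.Dict Int Int).items.filter
          (fun p => !((PySem.Dict.counter lb : PySem.Dict Int Int).contains p.1)) := by
  simp only [PySem.Dict.items_counter, PySem.Dict.contains_counter, List.filter_map]
  rw [pvOfList_filter]
  apply List.map_congr_left
  intro k hk
  have hk2 : (fun e => !lb.contains e) k = true := (List.mem_filter.1 hk).2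
  rw [List.count_filter (p := fun e => !lb.contains e) hk2]

theorem calculate_disparity_spec : Claim_equal_calculate_disparity := by
  intro list1 list2 _
  unfold Spec_calculate_disparity calculate_disparity calculate_disparity_alt
  simp only []
  set u := PySem.Set.symmDiff (PySem.Set.ofList list1) (PySem.Set.ofList list2) with hu
  -- normalise A's two loops
  have h1 : list1.foldl (pvCountStep u) PySem.Dict.empty
      = PySem.Dict.counter (list1.filter (fun e => !(list2.contains e))) := by
    rw [pvLoop_eq_counter]
    congr 1
    exact List.filter_congr (fun x hx => pvGuard1 list1 list2 x hx)
  set c1f := PySem.Dict.counter (list1.filter (fun e => !(list2.contains e))) with hc1f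
  set c2f := PySem.Dict.counter (list2.filter (fun e => !(list1.contains e))) with hc2f
  have h2 : (list2.foldl (pvCountStep u) (list1.foldl (pvCountStep u) PySem.Dict.empty)).items
      = c1f.items ++ c2f.items := by
    rw [h1, pvStep_funext,
        PySem.List.foldl_if_eq_foldl_filter (fun e => PySem.Set.contains u e) pvIns]
    have hfilt : list2.filter (fun e => PySem.Set.contains u e)
        = list2.filter (fun e => !(list1.contains e)) :=
      List.filter_congr (fun x hx => pvGuard2 list1 list2 x hx)
    rw [hfilt]
    have hfresh : ∀ e ∈ list2.filter (fun e => !(list1.contains e)),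
        e ∉ c1f.items.map Prod.fst := by
      intro e he hmem
      have he2 : e ∉ list1 := by
        have := (List.mem_filter.1 he).2
        simpa [List.contains_iff_mem] using this
      have : e ∈ c1f.keys := by simpa [PySem.Dict.keys] using hmem
      rw [hc1f, PySem.Dict.keys_counter, PySem.Set.mem_ofList] at this
      exact he2 (List.mem_filter.1 this).1
    have hmk : c1f = PySem.Dict.mk (c1f.items ++ []) := by rw [List.append_nil]
    calc ((list2.filter (fun e => !(list1.contains e))).foldl pvIns c1f).items
        = ((list2.filter (fun e => !(list1.contains e))).foldl pvIns
            (PySem.Dict.mk (c1f.items ++ []))).items := by rw [← hmk]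
      _ = c1f.items ++ ((list2.filter (fun e => !(list1.contains e))).foldl pvIns
            (PySem.Dict.mk [])).items :=
          pvFoldl_ins_append _ c1f.items [] hfresh
      _ = c1f.items ++ c2f.items := by
          rw [hc2f]
          congr 1
  rw [h2, hc1f, hc2f, pvCounter_filter_items list1 list2, pvCounter_filter_items list2 list1]
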